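-- pv_equiv track=rewrite | github.com/Shalombergman/Practice-complications | Complications.py | SumOfAllTriplets
-- ===== SOURCE A (Python) =====
-- def SumOfAllTriplets(array):
--     if len(array) < 3:
--         return 0
--     maxTriplet = array[0] + array[1] + array[2]
--     for i in range(len(array)-2):
--         current = array[i] + array[i + 1] + array[i + 2]
--         if current > maxTriplet:
--             maxTriplet = current
--     return maxTriplet
-- ===== SOURCE B (Python) =====
-- def SumOfAllTriplets(array):
--     if len(array) < 3:
--         return 0
--     # pass 1: prefix sums (pre[k] = sum of first k elements)
--     pre = [0]
--     s = 0
--     for x in array: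
--         s += x
--         pre.append(s)
--     # pass 2: each triplet sum is a difference of two prefix sums
--     best = pre[3] - pre[0]
--     for i in range(len(array) - 2):
--         cand = pre[i + 3] - pre[i]
--         if cand > best:
--             best = cand
--     return best
-- ===== Notes on version B (the rewrite author's own statement) =====
-- stated objective: alternative
-- what changed: B first builds a prefix-sum table in one pass and then takes the max of prefix differences pre[i+3]-pre[i], instead of re-adding the three window elements at every start index.
import Mathlib
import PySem

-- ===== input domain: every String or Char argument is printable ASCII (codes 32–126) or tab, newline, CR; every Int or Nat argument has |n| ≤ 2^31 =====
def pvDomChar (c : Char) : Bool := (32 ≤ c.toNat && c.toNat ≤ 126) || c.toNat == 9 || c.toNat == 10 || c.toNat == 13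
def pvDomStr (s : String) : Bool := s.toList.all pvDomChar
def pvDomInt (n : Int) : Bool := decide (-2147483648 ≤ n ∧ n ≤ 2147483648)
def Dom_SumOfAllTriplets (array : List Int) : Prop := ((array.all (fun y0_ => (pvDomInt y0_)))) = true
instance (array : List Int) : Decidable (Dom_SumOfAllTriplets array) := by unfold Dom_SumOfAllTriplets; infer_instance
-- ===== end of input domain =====

-- B replaces the per-index re-addition of the three window elements by a prefix-sum
-- table built in one pass, taking the max of the differences pre[i+3] - pre[i] (alternative decomposition).

-- ===== PORT A =====
def SumOfAllTriplets (array : List Int) : Int :=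
  if array.length < 3 then 0
  else
    let maxTriplet := PySem.List.pyGetD array 0 0 + PySem.List.pyGetD array 1 0
      + PySem.List.pyGetD array 2 0
    (PySem.List.pyRange 0 ((array.length : Int) - 2) 1).foldl
      (fun maxTriplet i =>
        let current := PySem.List.pyGetD array i 0 + PySem.List.pyGetD array (i + 1) 0
          + PySem.List.pyGetD array (i + 2) 0
        if current > maxTriplet then current else maxTriplet)
      maxTriplet

-- ===== PORT B =====
def SumOfAllTriplets_alt (array : List Int) : Int :=
  if array.length < 3 then 0
  else
    -- pass 1: prefix sums (pre[k] = sum of first k elements)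
    let sp := array.foldl (fun (acc : Int × List Int) x => (acc.1 + x, acc.2 ++ [acc.1 + x]))
      ((0 : Int), [(0 : Int)])
    let pre := sp.2
    -- pass 2: each triplet sum is a difference of two prefix sums
    let best := PySem.List.pyGetD pre 3 0 - PySem.List.pyGetD pre 0 0
    (PySem.List.pyRange 0 ((array.length : Int) - 2) 1).foldl
      (fun best i =>
        let cand := PySem.List.pyGetD pre (i + 3) 0 - PySem.List.pyGetD pre i 0
        if cand > best then cand else best)
      best

-- ===== PRECONDITION & SPEC =====
def Spec_SumOfAllTriplets (array : List Int) (out : Int) : Prop := out = SumOfAllTriplets_alt array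
instance (array : List Int) (out : Int) : Decidable (Spec_SumOfAllTriplets array out) := by unfold Spec_SumOfAllTriplets; infer_instance

-- ===== CLAIM (what is proved, stated in full; the proofs are below) =====
def Claim_equal_SumOfAllTriplets : Prop := ∀ (array : List Int), Dom_SumOfAllTriplets array → Spec_SumOfAllTriplets array (SumOfAllTriplets array)

-- ===== LEMMAS AND PROOFS =====

-- B's first pass computes (total sum, list of running prefix sums appended to p).
theorem prefix_foldl (a : List Int) (s : Int) (p : List Int) :
    a.foldl (fun (acc : Int × List Int) x => (acc.1 + x, acc.2 ++ [acc.1 + x])) (s, p)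
      = (s + a.sum, p ++ (List.range a.length).map (fun k => s + (a.take (k + 1)).sum)) := by
  induction a generalizing s p with
  | nil => simp
  | cons x t ih =>
    simp only [List.foldl_cons, ih, List.length_cons, List.range_succ_eq_map, List.map_cons,
      List.map_map, List.sum_cons, List.take_succ_cons]
    refine Prod.ext (by simp; ring) ?_
    simp only [Function.comp_def, List.take_zero, List.sum_nil, add_zero, List.append_assoc,
      List.singleton_append]
    congr 2
    apply List.map_congr_left
    intro k _
    simp [Nat.succ_eq_add_one]
    ring

-- the prefix table indexed at a natural k ≤ length gives (take k).sum
theorem pre_getD (a : List Int) (k : Nat) (hk : k ≤ a.length) :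
    PySem.List.pyGetD ([(0 : Int)] ++ (List.range a.length).map (fun j => (0 : Int) + (a.take (j + 1)).sum))
      (k : Int) 0 = (a.take k).sum := by
  rw [PySem.List.pyGetD_natCast]
  cases k with
  | zero => simp
  | succ m =>
    have hm : m < a.length := by omega
    simp [List.getD, hm]

-- a triplet sum is a difference of prefix sums
theorem take_window (a : List Int) (i : Nat) (h : i + 3 ≤ a.length) :
    (a.take (i + 3)).sum - (a.take i).sum
      = a.getD i 0 + a.getD (i + 1) 0 + a.getD (i + 2) 0 := by
  have h0 : i < a.length := by omega
  have h1 : i + 1 < a.length := by omega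
  have h2 : i + 2 < a.length := by omega
  have e2 : (a.take (i + 3)).sum = (a.take (i + 2)).sum + a[i + 2] :=
    List.sum_take_succ _ _ h2
  have e1 : (a.take (i + 2)).sum = (a.take (i + 1)).sum + a[i + 1] :=
    List.sum_take_succ _ _ h1
  have e0 : (a.take (i + 1)).sum = (a.take i).sum + a[i] :=
    List.sum_take_succ _ _ h0
  rw [e2, e1, e0, List.getD_eq_getElem _ _ h0, List.getD_eq_getElem _ _ h1,
    List.getD_eq_getElem _ _ h2]
  ring

-- ===== VERDICT (by name: the statement is the Claim_ definition above) =====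
theorem SumOfAllTriplets_spec : Claim_equal_SumOfAllTriplets := by
  intro array _
  unfold Spec_SumOfAllTriplets SumOfAllTriplets SumOfAllTriplets_alt
  by_cases h3 : array.length < 3
  · simp [h3]
  · have hlen : 3 ≤ array.length := by omega
    have hlenI : (3 : Int) ≤ (array.length : Int) := by exact_mod_cast hlen
    simp only [if_neg h3, prefix_foldl]
    have key : ∀ i : Int, 0 ≤ i → i < (array.length : Int) - 2 →
        PySem.List.pyGetD ([(0:Int)] ++ (List.range array.length).map
            (fun j => (0:Int) + (array.take (j+1)).sum)) (i + 3) 0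
          - PySem.List.pyGetD ([(0:Int)] ++ (List.range array.length).map
            (fun j => (0:Int) + (array.take (j+1)).sum)) i 0
        = PySem.List.pyGetD array i 0 + PySem.List.pyGetD array (i + 1) 0
          + PySem.List.pyGetD array (i + 2) 0 := by
      intro i h0 h2
      obtain ⟨k, rfl⟩ := Int.eq_ofNat_of_zero_le h0
      have hk3 : k + 3 ≤ array.length := by omega
      have c3 : ((k : Int) + 3) = ((k + 3 : Nat) : Int) := by push_cast; ring
      have c1 : ((k : Int) + 1) = ((k + 1 : Nat) : Int) := by push_cast; ring
      have c2 : ((k : Int) + 2) = ((k + 2 : Nat) : Int) := by push_cast; ring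
      rw [c3, c1, c2, pre_getD _ _ (by omega), pre_getD _ _ (by omega),
        take_window _ _ hk3, PySem.List.pyGetD_natCast, PySem.List.pyGetD_natCast,
        PySem.List.pyGetD_natCast]
    have init_eq : PySem.List.pyGetD ([(0:Int)] ++ (List.range array.length).map
            (fun j => (0:Int) + (array.take (j+1)).sum)) 3 0
          - PySem.List.pyGetD ([(0:Int)] ++ (List.range array.length).map
            (fun j => (0:Int) + (array.take (j+1)).sum)) 0 0
        = PySem.List.pyGetD array 0 0 + PySem.List.pyGetD array 1 0
          + PySem.List.pyGetD array 2 0 := by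
      simpa using key 0 le_rfl (by omega)
    rw [init_eq]
    apply Eq.symm
    apply PySem.List.foldl_congr_mem
    intro acc i hi
    have hb := (PySem.List.mem_pyRange_one).mp hi
    rw [key i hb.1 hb.2]
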